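-- pv_equiv track=rewrite | github.com/naemoo/Algorithm-Python | Impl/Problem30.py | solution
-- ===== SOURCE A (Python) =====
-- def solution(m, n, board):
--     board = list(map(list, board))
--     board = list(map(lambda x: list(x), zip(*board)))
--     for e in board:
--         e.reverse()
--     flag = True
--
--     while flag:
--         flag = False
--         erases = [[False for _ in range(m)] for _ in range(n)]
--         for i in range(n - 1):
--             for j in range(m - 1):
--                 tmp = set()
--                 for x in range(2):
--                     for y in range(2):
--                         tmp.add(board[i + x][j + y])
--                 if len(tmp) == 1 and not 0 in tmp:
--                     flag = True
--                     for x in range(2):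
--                         for y in range(2):
--                             erases[i + x][j + y] = True
--
--         for i in range(n):
--             for j in range(m - 1, -1, -1):
--                 if erases[i][j]:
--                     board[i].pop(j)
--                     board[i].append(0)
--
--     return sum(map(lambda x: len(list(filter(lambda y: y == 0, x))), board))
-- ===== SOURCE B (Python) =====
-- def solution(m, n, board):
--     grid = [list(row) for row in board]
--     while True:
--         marks = set()
--         for j in range(n - 1):
--             for i in range(m - 1):
--                 v = grid[i][j]
--                 if v != 0 and grid[i][j + 1] == v and grid[i + 1][j] == v and grid[i + 1][j + 1] == v:
--                     marks.update(((i, j), (i, j + 1), (i + 1, j), (i + 1, j + 1)))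
--         if not marks:
--             break
--         for j in range(n):
--             col = [grid[i][j] for i in range(m) if (i, j) not in marks]
--             col = [0] * (m - len(col)) + col
--             for i in range(m):
--                 grid[i][j] = col[i]
--     return sum(row.count(0) for row in grid)
-- ===== Notes on version B (the rewrite author's own statement) =====
-- stated objective: alternative
-- what changed: B drops A's transpose+reverse rotation and simulates on the board in its native orientation: it collects the cells of 2x2 monochromatic blocks into a set of coordinates by direct cell comparisons instead of A's per-window Python set test plus a parallel boolean matrix, applies gravity by rebuilding each column from its surviving cells with zeros prepended instead of A's per-index pop/append sweep, and counts zeros with row.count.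
-- outside the precondition, e.g. on solution(2, 2, ['BB', 'BBBA', 'BA']): A returns 0, B returns 4
import Mathlib
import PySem

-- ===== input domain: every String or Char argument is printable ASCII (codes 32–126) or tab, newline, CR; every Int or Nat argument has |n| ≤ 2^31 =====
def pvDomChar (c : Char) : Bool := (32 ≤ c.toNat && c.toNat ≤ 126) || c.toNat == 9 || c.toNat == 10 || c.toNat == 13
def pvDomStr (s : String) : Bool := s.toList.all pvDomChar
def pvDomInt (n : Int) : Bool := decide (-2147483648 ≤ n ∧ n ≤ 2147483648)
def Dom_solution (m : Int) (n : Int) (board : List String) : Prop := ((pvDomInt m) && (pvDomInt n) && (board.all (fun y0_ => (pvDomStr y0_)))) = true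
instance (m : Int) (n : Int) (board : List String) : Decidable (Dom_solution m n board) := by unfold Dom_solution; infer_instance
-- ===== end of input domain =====

-- B simulates the same block-erase game on the board in its native orientation (no transpose/reverse
-- rotation), marking blocks by direct comparisons and applying gravity by rebuilding each column.
-- A mutates only its local copies, so return-value equivalence is full equivalence.

-- a board cell: an original character, or the integer 0 that both programs write into cleared cells
inductive Cell where
  | z : Cell
  | c : Char → Cell
deriving DecidableEq, Repr

-- shared trivial accessors (both Pythons read/write nested lists the same way)
def toCells (board : List String) : List (List Cell) := board.map (fun s => s.toList.map Cell.c)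
def gval (g : List (List Cell)) (i j : Nat) : Cell := (g.getD i []).getD j Cell.z
def upd2 {α : Type} (g : List (List α)) (i j : Nat) (v : α) : List (List α) :=
  g.set i ((g.getD i []).set j v)

-- ===== PORT A =====
-- zip(*rows): transpose truncated to the shortest row (exact for zip on lists)
def pyZip (xss : List (List Cell)) : List (List Cell) :=
  match xss with
  | [] => []
  | x :: r =>
      let k := r.foldl (fun a l => min a l.length) x.length
      (List.range k).map (fun j => (x :: r).map (fun row => row.getD j Cell.z))

-- the while-body's scan: builds `erases` (n rows × m cols) and the flag
def scanA (m n : Int) (b : List (List Cell)) : Bool × List (List Bool) :=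
  let er0 := (List.range n.toNat).map (fun _ => (List.range m.toNat).map (fun _ => false))
  (List.range (n - 1).toNat).foldl (fun st i =>
    (List.range (m - 1).toNat).foldl (fun st j =>
      let tmp : PySem.Set Cell :=
        PySem.Set.ofList [gval b i j, gval b i (j + 1), gval b (i + 1) j, gval b (i + 1) (j + 1)]
      if PySem.Set.len tmp == 1 && !(PySem.Set.contains tmp Cell.z) then
        (true, upd2 (upd2 (upd2 (upd2 st.2 i j true) i (j + 1) true) (i + 1) j true) (i + 1) (j + 1) true)
      else st) st) (false, er0)

-- the while-body's gravity: for each row, pop erased indices from the top down, appending 0s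
def gravA (m n : Int) (er : List (List Bool)) (b : List (List Cell)) : List (List Cell) :=
  (List.range n.toNat).foldl (fun b i =>
    ((List.range m.toNat).reverse).foldl (fun b j =>
      if (er.getD i []).getD j false then
        b.set i (((b.getD i []).eraseIdx j) ++ [Cell.z])
      else b) b) b

-- the while loop; fuel bounds the pass count (each erasing pass clears ≥ 4 of ≤ m*n nonzero cells)
def loopA (m n : Int) : Nat → List (List Cell) → List (List Cell)
  | 0, b => b
  | fuel + 1, b =>
      let st := scanA m n b
      let b' := gravA m n st.2 b
      if st.1 then loopA m n fuel b' else b'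

def solution (m : Int) (n : Int) (board : List String) : Int :=
  let b := (pyZip (toCells board)).map List.reverse
  let fin := loopA m n (m.toNat * n.toNat + 1) b
  (fin.map (fun x => ((x.filter (fun y => y == Cell.z)).length : Int))).sum

-- ===== PORT B =====
def scanB (m n : Int) (g : List (List Cell)) : PySem.Set (Nat × Nat) :=
  (List.range (n - 1).toNat).foldl (fun marks j =>
    (List.range (m - 1).toNat).foldl (fun marks i =>
      let v := gval g i j
      if !(v == Cell.z) && gval g i (j + 1) == v && gval g (i + 1) j == v && gval g (i + 1) (j + 1) == v then
        PySem.Set.update marks [(i, j), (i, j + 1), (i + 1, j), (i + 1, j + 1)]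
      else marks) marks) PySem.Set.empty

def gravB (m n : Int) (marks : PySem.Set (Nat × Nat)) (g : List (List Cell)) : List (List Cell) :=
  (List.range n.toNat).foldl (fun g j =>
    let col := ((List.range m.toNat).filter (fun i => !(PySem.Set.contains marks (i, j)))).map
      (fun i => gval g i j)
    let col2 := List.replicate (m.toNat - col.length) Cell.z ++ col
    (List.range m.toNat).foldl (fun g i => upd2 g i j (col2.getD i Cell.z)) g) g

def loopB (m n : Int) : Nat → List (List Cell) → List (List Cell)
  | 0, g => g
  | fuel + 1, g =>
      let marks := scanB m n g
      if marks.isEmpty then g else loopB m n fuel (gravB m n marks g)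

def solution_alt (m : Int) (n : Int) (board : List String) : Int :=
  let fin := loopB m n (m.toNat * n.toNat + 1) (toCells board)
  (fin.map (fun r => (r.count Cell.z : Int))).sum

-- ===== PRECONDITION & SPEC =====
-- Pre_ admits every m ≤ 1 or n ≤ 1 (no 2x2 window fits: A returns 0 on any board) and
-- otherwise the problem's natural domain where the declared dimensions match the board
-- (m rows, each of length n). Excluded are only boards with m, n ≥ 2 whose shape
-- contradicts the declared dimensions: there A raises IndexError or scans an accidentally
-- zip-truncated board.
def Pre_solution (m : Int) (n : Int) (board : List String) : Prop :=
  (m ≤ 1 ∨ n ≤ 1) ∨ ((board.length : Int) = m ∧ ∀ s ∈ board, (s.toList.length : Int) = n)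
instance (m : Int) (n : Int) (board : List String) : Decidable (Pre_solution m n board) := by
  unfold Pre_solution; infer_instance

def pvWitness_solution : Int × Int × List String := (3, 2, ["AA", "AB", "BB"])

def Spec_solution (m : Int) (n : Int) (board : List String) (out : Int) : Prop := out = solution_alt m n board
instance (m : Int) (n : Int) (board : List String) (out : Int) : Decidable (Spec_solution m n board out) := by unfold Spec_solution; infer_instance

-- ===== CLAIM (what is proved, stated in full; the proofs are below) =====
def Claim_equal_solution : Prop := ∀ (m : Int) (n : Int) (board : List String), Dom_solution m n board → Pre_solution m n board → Spec_solution m n board (solution m n board)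

-- ===== LEMMAS AND PROOFS =====
-- ===== basics =====
def mval (g : List (List Bool)) (i j : Nat) : Bool := (g.getD i []).getD j false

def Rect {α : Type} (r c : Nat) (g : List (List α)) : Prop :=
  g.length = r ∧ ∀ row ∈ g, row.length = c

theorem getD_set_char {α : Type} (l : List α) (i j : Nat) (v d : α) :
    (l.set i v).getD j d = if j = i ∧ i < l.length then v else l.getD j d := by
  simp only [List.getD, List.getElem?_set]
  split_ifs with h1 h2 h3 h4 <;> simp_all

theorem rect_row_len {α : Type} {r c : Nat} {g : List (List α)} (h : Rect r c g) {i : Nat}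
    (hi : i < r) : (g.getD i []).length = c := by
  obtain ⟨h1, h2⟩ := h
  have hi' : i < g.length := by omega
  rw [List.getD_eq_getElem _ _ hi']
  exact h2 _ (List.getElem_mem hi')

theorem rect_upd2 {α : Type} {r c : Nat} {g : List (List α)} (h : Rect r c g) (i j : Nat) (v : α) :
    Rect r c (upd2 g i j v) := by
  by_cases hi : i < g.length
  · obtain ⟨h1, h2⟩ := h
    refine ⟨by simp [upd2, h1], ?_⟩
    intro row hrow
    rcases List.mem_or_eq_of_mem_set hrow with hmem | heq
    · exact h2 _ hmem
    · subst heq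
      simp only [List.length_set]
      rw [List.getD_eq_getElem _ _ hi]
      exact h2 _ (List.getElem_mem hi)
  · rw [upd2, List.set_eq_of_length_le (by omega)]
    exact h

theorem vval_upd2 {α : Type} (d : α) (g : List (List α)) (i j p q : Nat) (v : α) :
    ((upd2 g i j v).getD p []).getD q d =
      if p = i ∧ q = j ∧ i < g.length ∧ j < (g.getD i []).length then v
      else (g.getD p []).getD q d := by
  by_cases hi : i < g.length
  · rw [upd2, getD_set_char]
    by_cases hp : p = i
    · subst hp
      rw [if_pos ⟨rfl, hi⟩, getD_set_char]
      split_ifs with h1 h2 h3 <;> try rfl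
      · exact absurd ⟨rfl, h1.1, hi, h1.2⟩ h2
      · exact absurd ⟨h3.2.1, h3.2.2.2⟩ h1
    · rw [if_neg (by tauto), if_neg (by tauto)]
  · rw [upd2, List.set_eq_of_length_le (by omega), if_neg (by tauto)]

theorem gval_upd2 (g : List (List Cell)) (i j p q : Nat) (v : Cell) :
    gval (upd2 g i j v) p q =
      if p = i ∧ q = j ∧ i < g.length ∧ j < (g.getD i []).length then v else gval g p q :=
  vval_upd2 Cell.z g i j p q v

theorem mval_upd2 (g : List (List Bool)) (i j p q : Nat) (v : Bool) :
    mval (upd2 g i j v) p q =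
      if p = i ∧ q = j ∧ i < g.length ∧ j < (g.getD i []).length then v else mval g p q :=
  vval_upd2 false g i j p q v
-- ===== scan characterization =====
def paint (g : List (List Bool)) (i j : Nat) : List (List Bool) :=
  upd2 (upd2 (upd2 (upd2 g i j true) i (j + 1) true) (i + 1) j true) (i + 1) (j + 1) true

theorem mval_paint {r c : Nat} {g : List (List Bool)} (h : Rect r c g) {i j : Nat}
    (hi : i + 1 < r) (hj : j + 1 < c) (p q : Nat) :
    mval (paint g i j) p q =
      (mval g p q || ((p == i || p == i + 1) && (q == j || q == j + 1))) := by
  have h1 := rect_upd2 h i j true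
  have h2 := rect_upd2 h1 i (j + 1) true
  have h3 := rect_upd2 h2 (i + 1) j true
  have len1 : (upd2 g i j true).length = r := h1.1
  have len2 : (upd2 (upd2 g i j true) i (j+1) true).length = r := h2.1
  have len3 : (upd2 (upd2 (upd2 g i j true) i (j+1) true) (i+1) j true).length = r := h3.1
  rw [paint, mval_upd2, mval_upd2, mval_upd2, mval_upd2]
  rw [h.1, len1, len2, len3,
      rect_row_len h (by omega), rect_row_len h1 (by omega),
      rect_row_len h2 (by omega), rect_row_len h3 (by omega)]
  have hir : i < r := by omega
  have hjr : j < c := by omega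
  split_ifs with a1 a2 a3 a4 <;> simp_all
  omega

theorem rect_paint {r c : Nat} {g : List (List Bool)} (h : Rect r c g) (i j : Nat) :
    Rect r c (paint g i j) :=
  rect_upd2 (rect_upd2 (rect_upd2 (rect_upd2 h i j true) i (j+1) true) (i+1) j true) (i+1) (j+1) true

-- inner fold of a scan pass
theorem scan_inner_char {r c : Nat} (cond : Nat → Bool) (i : Nat) (hi : i + 1 < r) :
    ∀ (J : List Nat) (st : Bool × List (List Bool)), Rect r c st.2 → (∀ j ∈ J, j + 1 < c) →
    ((J.foldl (fun st j => if cond j then (true, paint st.2 i j) else st) st).1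
        = (st.1 || J.any cond) ∧
     Rect r c (J.foldl (fun st j => if cond j then (true, paint st.2 i j) else st) st).2 ∧
     ∀ p q, mval (J.foldl (fun st j => if cond j then (true, paint st.2 i j) else st) st).2 p q =
       (mval st.2 p q || J.any (fun j => cond j && ((p == i || p == i + 1) && (q == j || q == j + 1))))) := by
  intro J
  induction J with
  | nil => intro st hst _; exact ⟨by simp, hst, by simp⟩
  | cons j J ih =>
    intro st hst hJ
    by_cases hc : cond j
    · have hj : j + 1 < c := hJ j (by simp)
      have hst' : Rect r c (paint st.2 i j) := rect_paint hst i j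
      obtain ⟨e1, e2, e3⟩ := ih (true, paint st.2 i j) hst' (fun x hx => hJ x (by simp [hx]))
      simp only [List.foldl_cons, if_pos hc]
      refine ⟨?_, e2, ?_⟩
      · simp [e1, hc]
      · intro p q
        rw [e3 p q, mval_paint hst hi hj]
        simp [hc, Bool.or_assoc]
    · obtain ⟨e1, e2, e3⟩ := ih st hst (fun x hx => hJ x (by simp [hx]))
      simp only [List.foldl_cons, if_neg hc]
      refine ⟨?_, e2, ?_⟩
      · simp [e1, hc]
      · intro p q
        rw [e3 p q]
        simp [hc]

theorem scan_outer_char {r c : Nat} (cond : Nat → Nat → Bool) :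
    ∀ (I : List Nat) (J : List Nat) (st : Bool × List (List Bool)), Rect r c st.2 →
    (∀ i ∈ I, i + 1 < r) → (∀ j ∈ J, j + 1 < c) →
    ((I.foldl (fun st i =>
        J.foldl (fun st j => if cond i j then (true, paint st.2 i j) else st) st) st).1
        = (st.1 || I.any (fun i => J.any (cond i))) ∧
     Rect r c (I.foldl (fun st i =>
        J.foldl (fun st j => if cond i j then (true, paint st.2 i j) else st) st) st).2 ∧
     ∀ p q, mval (I.foldl (fun st i =>
        J.foldl (fun st j => if cond i j then (true, paint st.2 i j) else st) st) st).2 p q =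
       (mval st.2 p q || I.any (fun i => J.any (fun j =>
          cond i j && ((p == i || p == i + 1) && (q == j || q == j + 1)))))) := by
  intro I
  induction I with
  | nil => intro J st hst _ _; exact ⟨by simp, hst, by simp⟩
  | cons i I ih =>
    intro J st hst hI hJ
    have hi : i + 1 < r := hI i (by simp)
    obtain ⟨f1, f2, f3⟩ := scan_inner_char (cond i) i hi J st hst hJ
    obtain ⟨e1, e2, e3⟩ := ih J _ f2 (fun x hx => hI x (by simp [hx])) hJ
    simp only [List.foldl_cons]
    refine ⟨?_, e2, ?_⟩
    · rw [e1, f1]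
      simp [Bool.or_assoc]
    · intro p q
      rw [e3 p q, f3 p q]
      simp [Bool.or_assoc]
-- ===== instantiating the scan characterization for the two ports =====
def condA (b : List (List Cell)) (i j : Nat) : Bool :=
  PySem.Set.len (PySem.Set.ofList [gval b i j, gval b i (j + 1), gval b (i + 1) j, gval b (i + 1) (j + 1)]) == 1 &&
  !(PySem.Set.contains (PySem.Set.ofList [gval b i j, gval b i (j + 1), gval b (i + 1) j, gval b (i + 1) (j + 1)]) Cell.z)

def condB (g : List (List Cell)) (i j : Nat) : Bool :=
  !(gval g i j == Cell.z) && gval g i (j + 1) == gval g i j &&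
  gval g (i + 1) j == gval g i j && gval g (i + 1) (j + 1) == gval g i j

def er0 (m n : Int) : List (List Bool) :=
  (List.range n.toNat).map (fun _ => (List.range m.toNat).map (fun _ => false))

theorem scanA_eq (m n : Int) (b : List (List Cell)) : scanA m n b =
    (List.range (n - 1).toNat).foldl (fun st i =>
      (List.range (m - 1).toNat).foldl (fun st j =>
        if condA b i j then (true, paint st.2 i j) else st) st) (false, er0 m n) := rfl

theorem rect_er0 (m n : Int) : Rect n.toNat m.toNat (er0 m n) := by
  constructor
  · simp [er0]
  · intro row hrow
    simp only [er0, List.mem_map] at hrow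
    obtain ⟨_, _, h⟩ := hrow
    simp [← h]

theorem getD_getD_replicate (r c : Nat) (p q : Nat) :
    (((List.replicate r (List.replicate c false)).getD p []).getD q false) = false := by
  simp only [List.getD, List.getElem?_replicate]
  split_ifs <;> simp [List.getElem?_replicate]
  split_ifs <;> simp

theorem mval_er0 (m n : Int) (p q : Nat) : mval (er0 m n) p q = false := by
  unfold mval er0
  rw [List.map_const', List.map_const', List.length_range, List.length_range]
  exact getD_getD_replicate _ _ p q

-- the 2x2-window tests of the two ports decide the same property of the four cells
theorem set4_iff (a b c d : Cell) :
    (PySem.Set.len (PySem.Set.ofList [a, b, c, d]) == 1 &&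
     !(PySem.Set.contains (PySem.Set.ofList [a, b, c, d]) Cell.z)) = true ↔
    (a ≠ Cell.z ∧ b = a ∧ c = a ∧ d = a) := by
  constructor
  · rintro h
    rw [Bool.and_eq_true] at h
    obtain ⟨hlen, hcon⟩ := h
    have hz : Cell.z ∉ PySem.Set.ofList [a, b, c, d] := by
      intro hmem
      rw [Bool.not_eq_true'] at hcon
      rw [(PySem.Set.contains_iff _ _).mpr hmem] at hcon
      simp at hcon
    have hlen1 : (PySem.Set.ofList [a, b, c, d]).length = 1 := by
      have := beq_iff_eq.mp hlen
      unfold PySem.Set.len at this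
      omega
    obtain ⟨u, hu⟩ := List.length_eq_one_iff.mp hlen1
    have hall : ∀ x ∈ ([a, b, c, d] : List Cell), x = u := by
      intro x hx
      have : x ∈ PySem.Set.ofList [a, b, c, d] := (PySem.Set.mem_ofList _ _).mpr hx
      rw [hu] at this
      simpa using this
    have ha := hall a (by simp)
    have hb := hall b (by simp)
    have hc := hall c (by simp)
    have hd := hall d (by simp)
    refine ⟨?_, by rw [hb, ha], by rw [hc, ha], by rw [hd, ha]⟩
    intro hza
    apply hz
    apply (PySem.Set.mem_ofList _ _).mpr
    simp [← hza, ha]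
  · rintro ⟨hz, hb, hc, hd⟩
    rw [hb, hc, hd]
    have h4 : PySem.Set.ofList [a, a, a, a] = [a] := by
      simp [PySem.Set.ofList_cons, PySem.Set.discard]
    rw [h4]
    simp [PySem.Set.len, PySem.Set.contains]
    simpa using fun h => hz h.symm

def HitProp (g : List (List Cell)) (p q : Nat) : Prop :=
  gval g p q ≠ Cell.z ∧ gval g p (q + 1) = gval g p q ∧
  gval g (p + 1) q = gval g p q ∧ gval g (p + 1) (q + 1) = gval g p q

theorem condB_iff (g : List (List Cell)) (p q : Nat) : condB g p q = true ↔ HitProp g p q := by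
  simp [condB, HitProp, and_assoc]

theorem condA_iff (b : List (List Cell)) (i j : Nat) : condA b i j = true ↔ HitProp b i j := by
  rw [condA, set4_iff]
  unfold HitProp
  tauto
-- ===== characterizing port B's set of marked coordinates =====
theorem marks_inner_char (cond : Nat → Bool) (j : Nat) :
    ∀ (J : List Nat) (s : PySem.Set (Nat × Nat)) (x : Nat × Nat),
      (x ∈ J.foldl (fun marks i => if cond i then
          PySem.Set.update marks [(i, j), (i, j + 1), (i + 1, j), (i + 1, j + 1)] else marks) s
        ↔ x ∈ s ∨ ∃ i ∈ J, cond i = true ∧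
            (x = (i, j) ∨ x = (i, j + 1) ∨ x = (i + 1, j) ∨ x = (i + 1, j + 1))) := by
  intro J
  induction J with
  | nil => intro s x; simp
  | cons i J ih =>
    intro s x
    by_cases hc : cond i
    · rw [List.foldl_cons, if_pos hc, ih, PySem.Set.mem_update]
      constructor
      · rintro (⟨hs | hw⟩ | ⟨i', hi', hc', hx⟩)
        · exact Or.inl hs
        · exact Or.inr ⟨i, by simp, hc, by simpa using hw⟩
        · exact Or.inr ⟨i', by simp [hi'], hc', hx⟩
      · rintro (hs | ⟨i', hi', hc', hx⟩)
        · exact Or.inl (Or.inl hs)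
        · rcases List.mem_cons.mp hi' with rfl | hi'
          · exact Or.inl (Or.inr (by simpa using hx))
          · exact Or.inr ⟨i', hi', hc', hx⟩
    · rw [List.foldl_cons, if_neg hc, ih]
      constructor
      · rintro (hs | ⟨i', hi', hc', hx⟩)
        · exact Or.inl hs
        · exact Or.inr ⟨i', by simp [hi'], hc', hx⟩
      · rintro (hs | ⟨i', hi', hc', hx⟩)
        · exact Or.inl hs
        · rcases List.mem_cons.mp hi' with rfl | hi'
          · exact absurd hc' (by simpa using hc)
          · exact Or.inr ⟨i', hi', hc', hx⟩

theorem marks_outer_char (cond : Nat → Nat → Bool) :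
    ∀ (I J : List Nat) (s : PySem.Set (Nat × Nat)) (x : Nat × Nat),
      (x ∈ I.foldl (fun marks j => J.foldl (fun marks i => if cond j i then
          PySem.Set.update marks [(i, j), (i, j + 1), (i + 1, j), (i + 1, j + 1)] else marks) marks) s
        ↔ x ∈ s ∨ ∃ j ∈ I, ∃ i ∈ J, cond j i = true ∧
            (x = (i, j) ∨ x = (i, j + 1) ∨ x = (i + 1, j) ∨ x = (i + 1, j + 1))) := by
  intro I
  induction I with
  | nil => intro J s x; simp
  | cons j I ih =>
    intro J s x
    rw [List.foldl_cons, ih, marks_inner_char (cond j) j J s x]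
    constructor
    · rintro (⟨hs | ⟨i, hi, hc, hx⟩⟩ | ⟨j', hj', i, hi, hc, hx⟩)
      · exact Or.inl hs
      · exact Or.inr ⟨j, by simp, i, hi, hc, hx⟩
      · exact Or.inr ⟨j', by simp [hj'], i, hi, hc, hx⟩
    · rintro (hs | ⟨j', hj', i, hi, hc, hx⟩)
      · exact Or.inl (Or.inl hs)
      · rcases List.mem_cons.mp hj' with rfl | hj'
        · exact Or.inl (Or.inr ⟨i, hi, hc, hx⟩)
        · exact Or.inr ⟨j', hj', i, hi, hc, hx⟩

theorem scanB_eq (m n : Int) (g : List (List Cell)) : scanB m n g =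
    (List.range (n - 1).toNat).foldl (fun marks j =>
      (List.range (m - 1).toNat).foldl (fun marks i => if condB g i j then
        PySem.Set.update marks [(i, j), (i, j + 1), (i + 1, j), (i + 1, j + 1)] else marks) marks)
      PySem.Set.empty := rfl

theorem mem_scanB (m n : Int) (g : List (List Cell)) (x : Nat × Nat) :
    x ∈ scanB m n g ↔ ∃ j ∈ List.range (n - 1).toNat, ∃ i ∈ List.range (m - 1).toNat,
      condB g i j = true ∧ (x = (i, j) ∨ x = (i, j + 1) ∨ x = (i + 1, j) ∨ x = (i + 1, j + 1)) := by
  rw [scanB_eq, marks_outer_char (fun j i => condB g i j)]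
  simp [PySem.Set.empty]

theorem scanB_isEmpty (m n : Int) (g : List (List Cell)) :
    (scanB m n g).isEmpty = !((List.range (n - 1).toNat).any (fun j =>
      (List.range (m - 1).toNat).any (fun i => condB g i j))) := by
  rw [Bool.eq_iff_iff, List.isEmpty_iff, Bool.not_eq_true', List.any_eq_false]
  constructor
  · intro hnil j hj
    rw [Bool.not_eq_true, List.any_eq_false]
    intro i hi
    rw [Bool.not_eq_true]
    by_contra hc
    rw [Bool.not_eq_false] at hc
    have : (i, j) ∈ scanB m n g := (mem_scanB m n g (i, j)).mpr ⟨j, hj, i, hi, hc, Or.inl rfl⟩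
    rw [hnil] at this
    simp at this
  · intro h
    rw [List.eq_nil_iff_forall_not_mem]
    intro x hx
    obtain ⟨j, hj, i, hi, hc, _⟩ := (mem_scanB m n g x).mp hx
    have := h j hj
    rw [Bool.not_eq_true, List.any_eq_false] at this
    have := this i hi
    simp [hc] at this
-- ===== gravity, port A side =====
def rowOpA (m : Int) (er : List (List Bool)) (i : Nat) (r : List Cell) : List Cell :=
  ((List.range m.toNat).reverse).foldl (fun r j =>
    if (er.getD i []).getD j false then r.eraseIdx j ++ [Cell.z] else r) r

theorem gravA_eq (m n : Int) (er : List (List Bool)) (b : List (List Cell)) :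
    gravA m n er b = (List.range n.toNat).foldl (fun b i =>
      ((List.range m.toNat).reverse).foldl (fun b j =>
        if (er.getD i []).getD j false then b.set i (((b.getD i []).eraseIdx j) ++ [Cell.z])
        else b) b) b := rfl

-- the inner (per-row) fold acts on row i only
theorem foldl_row (cond : Nat → Bool) (f : Nat → List Cell → List Cell) (i : Nat) :
    ∀ (L : List Nat) (b : List (List Cell)), i < b.length →
      L.foldl (fun b j => if cond j then b.set i (f j (b.getD i [])) else b) b
        = b.set i (L.foldl (fun r j => if cond j then f j r else r) (b.getD i [])) := by
  intro L
  induction L with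
  | nil =>
    intro b hb
    simp only [List.foldl_nil]
    rw [List.getD_eq_getElem _ _ hb, List.set_getElem_self]
  | cons j L ih =>
    intro b hb
    by_cases hc : cond j
    · simp only [List.foldl_cons, if_pos hc]
      rw [ih _ (by simpa using hb)]
      rw [getD_set_char, if_pos ⟨rfl, hb⟩, List.set_set]
    · simp only [List.foldl_cons, if_neg hc]
      exact ih b hb

theorem foldl_row_oob (cond : Nat → Bool) (f : Nat → List Cell → List Cell) (i : Nat) :
    ∀ (L : List Nat) (b : List (List Cell)), b.length ≤ i →
      L.foldl (fun b j => if cond j then b.set i (f j (b.getD i [])) else b) b = b := by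
  intro L
  induction L with
  | nil => intro b _; rfl
  | cons j L ih =>
    intro b hb
    by_cases hc : cond j
    · simp only [List.foldl_cons, if_pos hc, List.set_eq_of_length_le hb]
      exact ih b hb
    · simp only [List.foldl_cons, if_neg hc]
      exact ih b hb

theorem gravA_char_aux (m : Int) (er : List (List Bool)) :
    ∀ (L : List Nat), L.Nodup → ∀ (b : List (List Cell)),
      (L.foldl (fun b i =>
        ((List.range m.toNat).reverse).foldl (fun b j =>
          if (er.getD i []).getD j false then b.set i (((b.getD i []).eraseIdx j) ++ [Cell.z])
          else b) b) b).length = b.length ∧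
      ∀ p, (L.foldl (fun b i =>
        ((List.range m.toNat).reverse).foldl (fun b j =>
          if (er.getD i []).getD j false then b.set i (((b.getD i []).eraseIdx j) ++ [Cell.z])
          else b) b) b).getD p []
        = if p ∈ L ∧ p < b.length then rowOpA m er p (b.getD p []) else b.getD p [] := by
  intro L
  induction L with
  | nil => intro _ b; exact ⟨rfl, by simp⟩
  | cons i L ih =>
    intro hnd b
    obtain ⟨hiL, hndL⟩ := List.nodup_cons.mp hnd
    simp only [List.foldl_cons]
    by_cases hi : i < b.length
    · rw [foldl_row (fun j => (er.getD i []).getD j false)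
           (fun j r => r.eraseIdx j ++ [Cell.z]) i _ b hi]
      have hrw : List.foldl (fun r j => if (er.getD i []).getD j false then r.eraseIdx j ++ [Cell.z] else r)
          (b.getD i []) ((List.range m.toNat).reverse) = rowOpA m er i (b.getD i []) := rfl
      rw [hrw]
      have hlen1 : (b.set i (rowOpA m er i (b.getD i []))).length = b.length := by simp
      obtain ⟨e1, e2⟩ := ih hndL (b.set i (rowOpA m er i (b.getD i [])))
      refine ⟨by rw [e1, hlen1], ?_⟩
      intro p
      rw [e2 p]
      by_cases hp : p = i
      · subst hp
        rw [if_neg (by tauto), if_pos ⟨by simp, hi⟩,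
            getD_set_char, if_pos ⟨rfl, hi⟩]
      · have hsame : (b.set i (rowOpA m er i (b.getD i []))).getD p [] = b.getD p [] := by
          rw [getD_set_char, if_neg (by tauto)]
        rw [hsame, hlen1]
        by_cases hpL : p ∈ L ∧ p < b.length
        · rw [if_pos hpL, if_pos ⟨by simp [hpL.1], hpL.2⟩]
        · rw [if_neg hpL, if_neg (by simp at hpL ⊢; tauto)]
    · rw [foldl_row_oob (fun j => (er.getD i []).getD j false)
           (fun j r => r.eraseIdx j ++ [Cell.z]) i _ b (by omega)]
      obtain ⟨e1, e2⟩ := ih hndL b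
      refine ⟨e1, ?_⟩
      intro p
      rw [e2 p]
      by_cases hp : p = i
      · subst hp
        rw [if_neg (by tauto), if_neg (by tauto)]
      · by_cases hpL : p ∈ L ∧ p < b.length
        · rw [if_pos hpL, if_pos ⟨by simp [hpL.1], hpL.2⟩]
        · rw [if_neg hpL, if_neg (by simp at hpL ⊢; tauto)]
-- ===== the descending pop/append sweep = keep-then-pad =====
def keepIdx (e : Nat → Bool) (k : Nat) : List Nat := (List.range k).filter (fun j => !(e j))
def dropCnt (e : Nat → Bool) (k : Nat) : Nat := ((List.range k).filter (fun j => e j)).length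

theorem popDesc_spec (e : Nat → Bool) :
    ∀ (k : Nat) (r s : List Cell), r.length = k →
      ((List.range k).reverse).foldl (fun r j => if e j then r.eraseIdx j ++ [Cell.z] else r) (r ++ s)
        = (keepIdx e k).map (fun j => r.getD j Cell.z) ++ s ++ List.replicate (dropCnt e k) Cell.z := by
  intro k
  induction k with
  | zero =>
    intro r s hr
    rw [List.length_eq_zero_iff.mp hr]
    simp [keepIdx, dropCnt]
  | succ k ih =>
    intro r s hr
    have hne : r ≠ [] := by intro h; subst h; simp at hr
    obtain ⟨r0, a, hra⟩ : ∃ r0 a, r = r0 ++ [a] :=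
      ⟨r.dropLast, r.getLast hne, (List.dropLast_append_getLast hne).symm⟩
    have hr0 : r0.length = k := by
      subst hra; simp at hr; omega
    subst hra
    rw [List.range_succ, List.reverse_append, List.reverse_singleton, List.singleton_append,
        List.foldl_cons]
    have hkeep : (keepIdx e (k+1)).map (fun j => (r0 ++ [a]).getD j Cell.z)
        = (keepIdx e k).map (fun j => r0.getD j Cell.z)
          ++ (if e k then [] else [a]) := by
      unfold keepIdx
      rw [List.range_succ, List.filter_append]
      rw [List.map_append]
      congr 1
      · apply List.map_congr_left
        intro j hj
        have hjk : j < k := by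
          have := List.mem_range.mp (List.mem_of_mem_filter hj)
          omega
        exact List.getD_append r0 [a] Cell.z j (by omega)
      · by_cases hek : e k
        · simp [hek]
        · have hlast : (r0 ++ [a])[k]?.getD Cell.z = a := by
            rw [List.getElem?_append_right (by omega)]
            simp [hr0]
          simp [hek, hlast]
    by_cases hek : e k
    · rw [if_pos hek]
      have herase : ((r0 ++ [a]) ++ s).eraseIdx k = r0 ++ s := by
        rw [List.append_assoc, List.eraseIdx_append_of_length_le (by omega)]
        have : (([a] ++ s).eraseIdx (k - r0.length)) = s := by
          rw [hr0]; simp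
        rw [this]
      rw [herase]
      have hres := ih r0 (s ++ [Cell.z]) hr0
      rw [List.append_assoc r0 s [Cell.z], hres]
      rw [hkeep, if_pos hek]
      have hcnt : dropCnt e (k+1) = dropCnt e k + 1 := by
        unfold dropCnt
        rw [List.range_succ, List.filter_append]
        simp [hek]
      rw [hcnt]
      simp [List.replicate_succ, List.append_assoc]
    · rw [if_neg hek]
      have hres := ih r0 ([a] ++ s) hr0
      rw [List.append_assoc r0 [a] s, hres]
      rw [hkeep, if_neg hek]
      have hcnt : dropCnt e (k+1) = dropCnt e k := by
        unfold dropCnt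
        rw [List.range_succ, List.filter_append]
        simp [hek]
      rw [hcnt]
      simp [List.append_assoc]

theorem keep_drop_len (e : Nat → Bool) : ∀ k, (keepIdx e k).length + dropCnt e k = k := by
  intro k
  induction k with
  | zero => simp [keepIdx, dropCnt]
  | succ k ih =>
    unfold keepIdx dropCnt
    rw [List.range_succ, List.filter_append, List.filter_append, List.length_append,
        List.length_append]
    unfold keepIdx dropCnt at ih
    by_cases hek : e k <;> simp [hek] <;> omega
-- ===== gravity, port B side =====
def colListB (m : Int) (marks : PySem.Set (Nat × Nat)) (g : List (List Cell)) (j : Nat) : List Cell :=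
  ((List.range m.toNat).filter (fun i => !(PySem.Set.contains marks (i, j)))).map (fun i => gval g i j)

def colNewB (m : Int) (marks : PySem.Set (Nat × Nat)) (g : List (List Cell)) (j : Nat) : List Cell :=
  List.replicate (m.toNat - (colListB m marks g j).length) Cell.z ++ colListB m marks g j

theorem gravB_eq (m n : Int) (marks : PySem.Set (Nat × Nat)) (g : List (List Cell)) :
    gravB m n marks g = (List.range n.toNat).foldl (fun g j =>
      (List.range m.toNat).foldl (fun g' i => upd2 g' i j ((colNewB m marks g j).getD i Cell.z)) g) g := rfl

theorem upd2_row_len {α : Type} (g : List (List α)) (i j : Nat) (v : α) (p : Nat) :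
    ((upd2 g i j v).getD p []).length = (g.getD p []).length := by
  by_cases hi : i < g.length
  · rw [upd2, getD_set_char]
    split_ifs with h
    · obtain ⟨hpi, _⟩ := h
      subst hpi
      simp
    · rfl
  · rw [upd2, List.set_eq_of_length_le (by omega)]

theorem writeCol_char (j : Nat) (c : List Cell) :
    ∀ (L : List Nat), L.Nodup → ∀ (g : List (List Cell)),
      ((L.foldl (fun g i => upd2 g i j (c.getD i Cell.z)) g).length = g.length) ∧
      (∀ p, ((L.foldl (fun g i => upd2 g i j (c.getD i Cell.z)) g).getD p []).length
          = (g.getD p []).length) ∧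
      (∀ p q, gval (L.foldl (fun g i => upd2 g i j (c.getD i Cell.z)) g) p q =
        if p ∈ L ∧ q = j ∧ p < g.length ∧ j < (g.getD p []).length then c.getD p Cell.z
        else gval g p q) := by
  intro L
  induction L with
  | nil => intro _ g; exact ⟨rfl, fun _ => rfl, by simp⟩
  | cons i L ih =>
    intro hnd g
    obtain ⟨hiL, hndL⟩ := List.nodup_cons.mp hnd
    simp only [List.foldl_cons]
    obtain ⟨e1, e2, e3⟩ := ih hndL (upd2 g i j (c.getD i Cell.z))
    have hlen : (upd2 g i j (c.getD i Cell.z)).length = g.length := by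
      simp [upd2]
    refine ⟨by rw [e1, hlen], fun p => by rw [e2 p, upd2_row_len], ?_⟩
    intro p q
    rw [e3 p q]
    by_cases hp : p = i
    · subst hp
      rw [if_neg (by tauto)]
      rw [gval_upd2]
      by_cases hb : q = j ∧ p < g.length ∧ j < (g.getD p []).length
      · rw [if_pos ⟨rfl, hb.1.symm ▸ hb⟩, if_pos ⟨by simp, hb⟩]
        -- note: condition orders
      · rw [if_neg (by tauto), if_neg (by simp at hb ⊢; tauto)]
    · have hrow : ((upd2 g i j (c.getD i Cell.z)).getD p []).length = (g.getD p []).length :=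
        upd2_row_len _ _ _ _ _
      have hval : gval (upd2 g i j (c.getD i Cell.z)) p q = gval g p q := by
        rw [gval_upd2, if_neg (by tauto)]
      rw [hlen, hrow, hval]
      by_cases hb : p ∈ L ∧ q = j ∧ p < g.length ∧ j < (g.getD p []).length
      · rw [if_pos hb, if_pos ⟨by simp [hb.1], hb.2⟩]
      · rw [if_neg hb, if_neg (by simp at hb ⊢; tauto)]

theorem gravB_aux (m : Int) (marks : PySem.Set (Nat × Nat)) (N : Nat) :
    ∀ (L : List Nat), L.Nodup → (∀ x ∈ L, x < N) → ∀ (g : List (List Cell)),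
      Rect m.toNat N g →
      Rect m.toNat N (L.foldl (fun g j =>
        (List.range m.toNat).foldl (fun g' i => upd2 g' i j ((colNewB m marks g j).getD i Cell.z)) g) g) ∧
      ∀ p q, p < m.toNat →
        gval (L.foldl (fun g j =>
          (List.range m.toNat).foldl (fun g' i => upd2 g' i j ((colNewB m marks g j).getD i Cell.z)) g) g) p q
        = if q ∈ L then (colNewB m marks g q).getD p Cell.z else gval g p q := by
  intro L
  induction L with
  | nil => intro _ _ g hg; exact ⟨hg, by simp⟩
  | cons j L ih =>
    intro hnd hb g hg
    obtain ⟨hjL, hndL⟩ := List.nodup_cons.mp hnd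
    have hjN : j < N := hb j (by simp)
    simp only [List.foldl_cons]
    obtain ⟨w1, w2, w3⟩ := writeCol_char j (colNewB m marks g j) (List.range m.toNat)
      (List.nodup_range) g
    set g1 := (List.range m.toNat).foldl
      (fun g' i => upd2 g' i j ((colNewB m marks g j).getD i Cell.z)) g with hg1
    have hg1rect : Rect m.toNat N g1 := by
      constructor
      · rw [w1, hg.1]
      · intro row hrow
        have : ∀ p, (g1.getD p []).length = (g.getD p []).length := w2
        obtain ⟨p, hp, hrow'⟩ := List.getElem_of_mem hrow
        have hplen : p < g1.length := hp
        have : (g1.getD p []).length = (g.getD p []).length := w2 p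
        rw [List.getD_eq_getElem _ _ hplen, hrow'] at this
        rw [this]
        exact rect_row_len hg (by rw [w1, hg.1] at hplen; exact hplen)
    have hg1val : ∀ p q, p < m.toNat → gval g1 p q =
        if q = j then (colNewB m marks g j).getD p Cell.z else gval g p q := by
      intro p q hp
      rw [w3 p q]
      by_cases hq : q = j
      · subst hq
        rw [if_pos ⟨by simpa using hp, rfl, by rw [hg.1]; exact hp,
              by rw [rect_row_len hg hp]; exact hjN⟩, if_pos rfl]
      · rw [if_neg (by tauto), if_neg hq]
    obtain ⟨r1, r2⟩ := ih hndL (fun x hx => hb x (by simp [hx])) g1 hg1rect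
    refine ⟨r1, ?_⟩
    intro p q hp
    rw [r2 p q hp]
    have hcolsame : ∀ q', q' ≠ j → colNewB m marks g1 q' = colNewB m marks g q' := by
      intro q' hq'
      have hcl : colListB m marks g1 q' = colListB m marks g q' := by
        unfold colListB
        apply List.map_congr_left
        intro x hx
        have hxm : x < m.toNat := List.mem_range.mp (List.mem_of_mem_filter hx)
        rw [hg1val x q' hxm, if_neg hq']
      unfold colNewB
      rw [hcl]
    by_cases hq : q ∈ L
    · rw [if_pos hq, if_pos (by simp [hq]), hcolsame q (by rintro rfl; exact hjL hq)]
    · rw [if_neg hq, hg1val p q hp]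
      by_cases hqj : q = j
      · subst hqj
        rw [if_pos rfl, if_pos (by simp)]
      · rw [if_neg hqj, if_neg (by simp [hqj, hq])]
-- ===== counting zeros =====
def countA (b : List (List Cell)) : Int :=
  (b.map (fun x => ((x.filter (fun y => y == Cell.z)).length : Int))).sum

def countB (g : List (List Cell)) : Int :=
  (g.map (fun r => (r.count Cell.z : Int))).sum

theorem sum_map_eq_finset (l : List (List Cell)) (f : List Cell → Int) :
    (l.map f).sum = ∑ i ∈ Finset.range l.length, f (l.getD i []) := by
  induction l with
  | nil => simp
  | cons a l ih =>
    rw [List.map_cons, List.sum_cons, List.length_cons, Finset.sum_range_succ', ih]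
    simp
    ring

theorem filterlen_row (l : List Cell) :
    ((l.filter (fun y => y == Cell.z)).length : Int)
      = ∑ j ∈ Finset.range l.length, (if l.getD j Cell.z = Cell.z then (1 : Int) else 0) := by
  induction l with
  | nil => simp
  | cons a l ih =>
    rw [List.length_cons, Finset.sum_range_succ']
    simp only [List.getD_cons_succ, List.getD_cons_zero]
    rw [← ih]
    by_cases ha : a = Cell.z
    · simp [ha]
    · simp [ha]

theorem countA_eq {N M : Nat} (b : List (List Cell)) (hb : Rect N M b) :
    countA b = ∑ i ∈ Finset.range N, ∑ j ∈ Finset.range M,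
      (if gval b i j = Cell.z then (1 : Int) else 0) := by
  unfold countA
  rw [sum_map_eq_finset, hb.1]
  apply Finset.sum_congr rfl
  intro i hi
  rw [filterlen_row, rect_row_len hb (Finset.mem_range.mp hi)]
  simp only [gval]
  rfl

theorem countB_eq {M N : Nat} (g : List (List Cell)) (hg : Rect M N g) :
    countB g = ∑ p ∈ Finset.range M, ∑ q ∈ Finset.range N,
      (if gval g p q = Cell.z then (1 : Int) else 0) := by
  unfold countB
  rw [sum_map_eq_finset, hg.1]
  apply Finset.sum_congr rfl
  intro p hp
  rw [List.count_eq_length_filter, filterlen_row, rect_row_len hg (Finset.mem_range.mp hp)]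
  simp only [gval]
  rfl

theorem count_rel {M N : Nat} (b g : List (List Cell)) (hb : Rect N M b) (hg : Rect M N g)
    (hrel : ∀ i j, i < N → j < M → gval b i j = gval g (M - 1 - j) i) :
    countA b = countB g := by
  rw [countA_eq b hb, countB_eq g hg]
  have step1 : ∀ i ∈ Finset.range N,
      (∑ j ∈ Finset.range M, if gval b i j = Cell.z then (1 : Int) else 0)
        = ∑ j ∈ Finset.range M, (if gval g j i = Cell.z then (1 : Int) else 0) := by
    intro i hi
    rw [← Finset.sum_range_reflect (fun j => if gval g j i = Cell.z then (1 : Int) else 0) M]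
    apply Finset.sum_congr rfl
    intro j hj
    rw [hrel i j (Finset.mem_range.mp hi) (Finset.mem_range.mp hj)]
  rw [Finset.sum_congr rfl step1, Finset.sum_comm]
-- ===== transferring the scan between the two orientations =====
theorem scanA_char (m n : Int) (b : List (List Cell)) :
    (scanA m n b).1 = (List.range (n - 1).toNat).any (fun i =>
        (List.range (m - 1).toNat).any (fun j => condA b i j)) ∧
    Rect n.toNat m.toNat (scanA m n b).2 ∧
    ∀ p q, mval (scanA m n b).2 p q = (List.range (n - 1).toNat).any (fun i =>
        (List.range (m - 1).toNat).any (fun j =>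
          condA b i j && ((p == i || p == i + 1) && (q == j || q == j + 1)))) := by
  rw [scanA_eq]
  obtain ⟨e1, e2, e3⟩ := scan_outer_char (condA b) (List.range (n - 1).toNat)
    (List.range (m - 1).toNat) (false, er0 m n) (rect_er0 m n)
    (fun i hi => by have := List.mem_range.mp hi; omega)
    (fun j hj => by have := List.mem_range.mp hj; omega)
  exact ⟨by rw [e1]; simp, e2, fun p q => by rw [e3 p q, mval_er0]; simp⟩

theorem hit_transfer {M N : Nat} {bA g : List (List Cell)}
    (hrel : ∀ i j, i < N → j < M → gval bA i j = gval g (M - 1 - j) i)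
    (i j : Nat) (hi : i + 1 < N) (hj : j + 1 < M) :
    HitProp bA i j ↔ HitProp g (M - 2 - j) i := by
  have e1 : gval bA i j = gval g (M - 1 - j) i := hrel i j (by omega) (by omega)
  have e2 : gval bA i (j + 1) = gval g (M - 2 - j) i := by
    have := hrel i (j + 1) (by omega) (by omega)
    rwa [show M - 1 - (j + 1) = M - 2 - j by omega] at this
  have e3 : gval bA (i + 1) j = gval g (M - 1 - j) (i + 1) := hrel (i + 1) j (by omega) (by omega)
  have e4 : gval bA (i + 1) (j + 1) = gval g (M - 2 - j) (i + 1) := by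
    have := hrel (i + 1) (j + 1) (by omega) (by omega)
    rwa [show M - 1 - (j + 1) = M - 2 - j by omega] at this
  unfold HitProp
  rw [e1, e2, e3, e4, show M - 2 - j + 1 = M - 1 - j by omega]
  constructor <;> rintro ⟨h1, h2, h3, h4⟩ <;> refine ⟨?_, ?_, ?_, ?_⟩ <;> simp_all

theorem cond_transfer {M N : Nat} {bA g : List (List Cell)}
    (hrel : ∀ i j, i < N → j < M → gval bA i j = gval g (M - 1 - j) i)
    (i j : Nat) (hi : i + 1 < N) (hj : j + 1 < M) :
    condA bA i j = condB g (M - 2 - j) i := by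
  rw [Bool.eq_iff_iff, condA_iff, condB_iff]
  exact hit_transfer hrel i j hi hj

theorem flag_transfer (m n : Int) {bA g : List (List Cell)}
    (hrel : ∀ i j, i < n.toNat → j < m.toNat → gval bA i j = gval g (m.toNat - 1 - j) i) :
    (List.range (n - 1).toNat).any (fun i => (List.range (m - 1).toNat).any (fun j => condA bA i j))
      = (List.range (n - 1).toNat).any (fun j => (List.range (m - 1).toNat).any (fun i => condB g i j)) := by
  rw [Bool.eq_iff_iff]
  simp only [List.any_eq_true, List.mem_range]
  constructor
  · rintro ⟨i, hi, j, hj, hc⟩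
    refine ⟨i, hi, m.toNat - 2 - j, by omega, ?_⟩
    rw [← cond_transfer hrel i j (by omega) (by omega)]
    exact hc
  · rintro ⟨j', hj', i', hi', hc⟩
    refine ⟨j', hj', m.toNat - 2 - i', by omega, ?_⟩
    rw [cond_transfer hrel j' (m.toNat - 2 - i') (by omega) (by omega),
        show m.toNat - 2 - (m.toNat - 2 - i') = i' by omega]
    exact hc

theorem mask_transfer (m n : Int) {bA g : List (List Cell)}
    (hrel : ∀ i j, i < n.toNat → j < m.toNat → gval bA i j = gval g (m.toNat - 1 - j) i)
    (i j : Nat) (hi : i < n.toNat) (hj : j < m.toNat) :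
    (List.range (n - 1).toNat).any (fun a => (List.range (m - 1).toNat).any (fun b =>
        condA bA a b && ((i == a || i == a + 1) && (j == b || j == b + 1))))
      = PySem.Set.contains (scanB m n g) (m.toNat - 1 - j, i) := by
  rw [Bool.eq_iff_iff, PySem.Set.contains_iff, mem_scanB]
  simp only [List.any_eq_true, List.mem_range, Bool.and_eq_true, Bool.or_eq_true, beq_iff_eq]
  constructor
  · rintro ⟨a, ha, b, hb, hc, hia, hjb⟩
    refine ⟨a, ha, m.toNat - 2 - b, by omega, ?_, ?_⟩
    · rw [← cond_transfer hrel a b (by omega) (by omega)]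
      exact hc
    · simp only [Prod.mk.injEq]
      omega
  · rintro ⟨j', hj', i', hi', hc, hx⟩
    refine ⟨j', hj', m.toNat - 2 - i', by omega, ?_, ?_, ?_⟩
    · rw [cond_transfer hrel j' (m.toNat - 2 - i') (by omega) (by omega),
          show m.toNat - 2 - (m.toNat - 2 - i') = i' by omega]
      exact hc
    · simp only [Prod.mk.injEq] at hx
      omega
    · simp only [Prod.mk.injEq] at hx
      omega
-- ===== gravity preserves the orientation relation =====
theorem foldl_id {α β : Type} (f : α → β → α) :
    ∀ (L : List β) (a : α), (∀ a x, x ∈ L → f a x = a) → L.foldl f a = a := by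
  intro L
  induction L with
  | nil => intro a _; rfl
  | cons x L ih =>
    intro a h
    rw [List.foldl_cons, h a x (by simp)]
    exact ih a (fun a' y hy => h a' y (by simp [hy]))

theorem gravA_id (m n : Int) (er : List (List Bool)) (b : List (List Cell))
    (h : ∀ i j, mval er i j = false) : gravA m n er b = b := by
  rw [gravA_eq]
  apply foldl_id
  intro b' i _
  apply foldl_id
  intro b'' j _
  have : (er.getD i []).getD j false = mval er i j := rfl
  rw [this, h i j]
  simp

theorem getD_replicate_self (c t : Nat) : (List.replicate c Cell.z).getD t Cell.z = Cell.z := by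
  simp only [List.getD, List.getElem?_replicate]
  split_ifs <;> simp

theorem range_reverse_map (M : Nat) :
    (List.range M).reverse = (List.range M).map (fun t => M - 1 - t) := by
  apply List.ext_getElem
  · simp
  · intro t h1 h2
    simp only [List.getElem_reverse, List.getElem_map, List.getElem_range,
      List.length_range] at *

theorem grav_rel (m n : Int) {bA g : List (List Cell)} {er : List (List Bool)} {marks : PySem.Set (Nat × Nat)}
    (hbA : Rect n.toNat m.toNat bA) (hg : Rect m.toNat n.toNat g)
    (hrel : ∀ i j, i < n.toNat → j < m.toNat → gval bA i j = gval g (m.toNat - 1 - j) i)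
    (hermask : ∀ i j, i < n.toNat → j < m.toNat → mval er i j = PySem.Set.contains marks (m.toNat - 1 - j, i)) :
    Rect n.toNat m.toNat (gravA m n er bA) ∧ Rect m.toNat n.toNat (gravB m n marks g) ∧
    (∀ i j, i < n.toNat → j < m.toNat →
      gval (gravA m n er bA) i j = gval (gravB m n marks g) (m.toNat - 1 - j) i) := by
  obtain ⟨bres, bval⟩ := gravB_aux m marks n.toNat (List.range n.toNat) List.nodup_range
    (fun x hx => List.mem_range.mp hx) g hg
  rw [← gravB_eq] at bres bval
  have haux := gravA_char_aux m er (List.range n.toNat) List.nodup_range bA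
  rw [← gravA_eq] at haux
  obtain ⟨alen, aval⟩ := haux
  -- per-row analysis
  have hrowfact : ∀ i j, i < n.toNat → j < m.toNat → gval (gravA m n er bA) i j
        = gval (gravB m n marks g) (m.toNat - 1 - j) i := by
    intro i j hiN hjM
    set M := m.toNat with hM
    set row := bA.getD i [] with hrow
    have hrowlen : row.length = M := rect_row_len hbA hiN
    have hi_in : i < bA.length := by rw [hbA.1]; exact hiN
    have hgetrow : (gravA m n er bA).getD i [] = rowOpA m er i row := by
      rw [aval i, if_pos ⟨List.mem_range.mpr hiN, hi_in⟩]
    -- the A row after gravity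
    have hpop : rowOpA m er i row
        = (keepIdx (fun j' => (er.getD i []).getD j' false) M).map (fun j' => row.getD j' Cell.z)
          ++ List.replicate (dropCnt (fun j' => (er.getD i []).getD j' false) M) Cell.z := by
      unfold rowOpA
      have h := popDesc_spec (fun j' => (er.getD i []).getD j' false) M row [] hrowlen
      simpa using h
    -- the B column after gravity
    have hbcol : gval (gravB m n marks g) (M - 1 - j) i
        = (colNewB m marks g i).getD (M - 1 - j) Cell.z := by
      rw [bval (M - 1 - j) i (by omega), if_pos (List.mem_range.mpr hiN)]
    -- keep lists match up to reversal
    have hrev : (colListB m marks g i).reverse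
        = ((List.range M).filter (fun t => !(PySem.Set.contains marks (M - 1 - t, i)))).map
            (fun t => gval g (M - 1 - t) i) := by
      unfold colListB
      rw [← List.map_reverse, ← List.filter_reverse, range_reverse_map, List.filter_map,
          List.map_map]
      rfl
    have hfeq : (List.range M).filter (fun j' => !((er.getD i []).getD j' false))
        = (List.range M).filter (fun t => !(PySem.Set.contains marks (M - 1 - t, i))) := by
      apply List.filter_congr
      intro j' hj'
      have hj'M : j' < M := List.mem_range.mp hj'
      have e : (er.getD i []).getD j' false = mval er i j' := rfl
      rw [e, hermask i j' hiN hj'M]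
    have hkeep : (keepIdx (fun j' => (er.getD i []).getD j' false) M).map
          (fun j' => row.getD j' Cell.z)
        = (colListB m marks g i).reverse := by
      rw [hrev]
      unfold keepIdx
      rw [hfeq]
      apply List.map_congr_left
      intro j' hj'
      have hj'M : j' < M := List.mem_range.mp (List.mem_of_mem_filter hj')
      exact hrel i j' hiN hj'M
    have hK : ((keepIdx (fun j' => (er.getD i []).getD j' false) M).map
          (fun j' => row.getD j' Cell.z)).length
        = (colListB m marks g i).length := by rw [hkeep, List.length_reverse]
    set K := (colListB m marks g i).length with hKdef
    have hKL : (keepIdx (fun j' => (er.getD i []).getD j' false) M).length = K := by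
      have h2 := hK
      rwa [List.length_map] at h2
    have hKM : K ≤ M := by
      rw [← hKL]
      unfold keepIdx
      calc (List.filter (fun j => !(fun j' => (er.getD i []).getD j' false) j) (List.range M)).length
          ≤ (List.range M).length := List.length_filter_le _ _
        _ = M := by rw [List.length_range]
    have hsplit := keep_drop_len (fun j' => (er.getD i []).getD j' false) M
    have hcnt : dropCnt (fun j' => (er.getD i []).getD j' false) M = M - K := by
      omega
    -- compare entrywise
    rw [hbcol]
    have hL : gval (gravA m n er bA) i j = ((gravA m n er bA).getD i []).getD j Cell.z := rfl
    rw [hL, hgetrow, hpop]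
    unfold colNewB
    rw [← hKdef, hcnt]
    by_cases hjK : j < K
    · rw [List.getD_append _ _ _ _ (by rw [hK]; omega)]
      rw [List.getD_append_right _ _ _ _ (by rw [List.length_replicate]; omega)]
      rw [hkeep, List.getD_reverse _ (by omega)]
      rw [List.length_replicate, ← hKdef]
      congr 1
      omega
    · rw [List.getD_append_right _ _ _ _ (by rw [hK]; omega)]
      rw [List.getD_append _ _ _ _ (by rw [List.length_replicate]; omega)]
      rw [getD_replicate_self, getD_replicate_self]
  refine ⟨⟨by rw [alen, hbA.1], ?_⟩, bres, hrowfact⟩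
  -- row lengths of the A result
  intro rowx hrowx
  obtain ⟨p, hp, hrow'⟩ := List.getElem_of_mem hrowx
  have hpN : p < n.toNat := by rw [alen, hbA.1] at hp; exact hp
  have : (gravA m n er bA).getD p [] = rowOpA m er p (bA.getD p []) := by
    rw [aval p, if_pos ⟨List.mem_range.mpr hpN, by rw [hbA.1]; exact hpN⟩]
  rw [List.getD_eq_getElem _ _ hp, hrow'] at this
  rw [this]
  have hrowlen : (bA.getD p []).length = m.toNat := rect_row_len hbA hpN
  have hpop := popDesc_spec (fun j' => (er.getD p []).getD j' false) m.toNat (bA.getD p []) [] hrowlen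
  have : rowOpA m er p (bA.getD p [])
      = (keepIdx (fun j' => (er.getD p []).getD j' false) m.toNat).map (fun j' => (bA.getD p []).getD j' Cell.z)
        ++ List.replicate (dropCnt (fun j' => (er.getD p []).getD j' false) m.toNat) Cell.z := by
    unfold rowOpA
    simpa using hpop
  rw [this, List.length_append, List.length_map, List.length_replicate]
  have hsplit := keep_drop_len (fun j' => (er.getD p []).getD j' false) m.toNat
  omega
-- ===== the loop relation and the main theorem =====
theorem loop_rel (m n : Int) :
    ∀ (fuel : Nat) (bA g : List (List Cell)),
      Rect n.toNat m.toNat bA → Rect m.toNat n.toNat g →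
      (∀ i j, i < n.toNat → j < m.toNat → gval bA i j = gval g (m.toNat - 1 - j) i) →
      countA (loopA m n fuel bA) = countB (loopB m n fuel g) := by
  intro fuel
  induction fuel with
  | zero => intro bA g hbA hg hrel; exact count_rel bA g hbA hg hrel
  | succ fuel ih =>
    intro bA g hbA hg hrel
    obtain ⟨a1, a2, a3⟩ := scanA_char m n bA
    have hflag : (scanA m n bA).1 = !((scanB m n g).isEmpty) := by
      rw [a1, scanB_isEmpty, Bool.not_not]
      exact flag_transfer m n hrel
    have hmaskrel : ∀ i j, i < n.toNat → j < m.toNat →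
        mval (scanA m n bA).2 i j = PySem.Set.contains (scanB m n g) (m.toNat - 1 - j, i) := by
      intro i j hi hj
      rw [a3]
      exact mask_transfer m n hrel i j hi hj
    have hA : loopA m n (fuel + 1) bA =
        (if (scanA m n bA).1 then loopA m n fuel (gravA m n (scanA m n bA).2 bA)
         else gravA m n (scanA m n bA).2 bA) := rfl
    have hB : loopB m n (fuel + 1) g =
        (if (scanB m n g).isEmpty then g
         else loopB m n fuel (gravB m n (scanB m n g) g)) := rfl
    rw [hA, hB]
    by_cases hfl : (scanB m n g).isEmpty
    · rw [if_pos hfl]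
      have hflA : (scanA m n bA).1 = false := by rw [hflag, hfl]; rfl
      rw [hflA, if_neg (by simp)]
      have hhits : (List.range (n - 1).toNat).any (fun i =>
          (List.range (m - 1).toNat).any (fun j => condA bA i j)) = false := by
        rw [← a1]; exact hflA
      have hzero : ∀ p q, mval (scanA m n bA).2 p q = false := by
        intro p q
        rw [a3 p q]
        rw [List.any_eq_false] at hhits
        rw [List.any_eq_false]
        intro i hi
        have hinner := hhits i hi
        rw [Bool.not_eq_true, List.any_eq_false] at hinner
        rw [Bool.not_eq_true, List.any_eq_false]
        intro j hj
        have hc := hinner j hj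
        rw [Bool.not_eq_true] at hc ⊢
        rw [hc]
        simp
      rw [gravA_id m n _ bA hzero]
      exact count_rel bA g hbA hg hrel
    · rw [if_neg hfl]
      have hemp : (scanB m n g).isEmpty = false := by
        rw [← Bool.not_eq_true]
        exact hfl
      have hflA : (scanA m n bA).1 = true := by
        rw [hflag, hemp]
        rfl
      rw [hflA, if_pos rfl]
      obtain ⟨r1, r2, r3⟩ := grav_rel m n hbA hg hrel hmaskrel
      exact ih _ _ r1 r2 r3

theorem fold_min_const (N : Nat) :
    ∀ (r : List (List Cell)), (∀ l ∈ r, l.length = N) →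
      r.foldl (fun a l => min a l.length) N = N := by
  intro r
  induction r with
  | nil => intro _; rfl
  | cons x r ih =>
    intro h
    rw [List.foldl_cons, h x (by simp), Nat.min_self]
    exact ih (fun l hl => h l (by simp [hl]))

theorem pyZip_rect {M N : Nat} (g : List (List Cell)) (hg : Rect M N g) (hne : g ≠ []) :
    pyZip g = (List.range N).map (fun q => g.map (fun row => row.getD q Cell.z)) := by
  cases g with
  | nil => exact absurd rfl hne
  | cons x r =>
    show (let k := r.foldl (fun a l => min a l.length) x.length
      (List.range k).map (fun j => (x :: r).map (fun row => row.getD j Cell.z)))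
      = (List.range N).map (fun q => (x :: r).map (fun row => row.getD q Cell.z))
    have hx : x.length = N := hg.2 x (by simp)
    have hk : r.foldl (fun a l => min a l.length) x.length = N := by
      rw [hx]
      exact fold_min_const N r (fun l hl => hg.2 l (by simp [hl]))
    simp only [hk]

theorem getD_map_lt {α β : Type} (l : List α) (f : α → β) (p : Nat) (hp : p < l.length)
    (d : β) (d' : α) : (l.map f).getD p d = f (l.getD p d') := by
  rw [List.getD_eq_getElem _ _ (by simpa using hp), List.getD_eq_getElem _ _ hp,
      List.getElem_map]
-- ===== the degenerate cases m ≤ 1 or n ≤ 1: no 2x2 window fits, both programs count 0 =====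
theorem scanA_fst_trivial (m n : Int) (b : List (List Cell)) (h : m ≤ 1 ∨ n ≤ 1) :
    (scanA m n b).1 = false := by
  obtain ⟨a1, _, _⟩ := scanA_char m n b
  rw [a1]
  rcases h with h | h
  · have : (m - 1).toNat = 0 := by omega
    simp [this]
  · have : (n - 1).toNat = 0 := by omega
    simp [this]

theorem scanB_isEmpty_trivial (m n : Int) (g : List (List Cell)) (h : m ≤ 1 ∨ n ≤ 1) :
    (scanB m n g).isEmpty = true := by
  rw [scanB_isEmpty]
  rcases h with h | h
  · have : (m - 1).toNat = 0 := by omega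
    simp [this]
  · have : (n - 1).toNat = 0 := by omega
    simp [this]

theorem erases_trivial (m n : Int) (b : List (List Cell)) (h : m ≤ 1 ∨ n ≤ 1) :
    ∀ p q, mval (scanA m n b).2 p q = false := by
  obtain ⟨_, _, a3⟩ := scanA_char m n b
  intro p q
  rw [a3 p q]
  rcases h with h | h
  · have : (m - 1).toNat = 0 := by omega
    simp [this]
  · have : (n - 1).toNat = 0 := by omega
    simp [this]

theorem fold_min_le :
    ∀ (r : List (List Cell)) (a : Nat),
      r.foldl (fun a l => min a l.length) a ≤ a ∧
      ∀ l ∈ r, r.foldl (fun a l => min a l.length) a ≤ l.length := by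
  intro r
  induction r with
  | nil => intro a; exact ⟨le_refl a, by simp⟩
  | cons x r ih =>
    intro a
    rw [List.foldl_cons]
    obtain ⟨h1, h2⟩ := ih (min a x.length)
    refine ⟨le_trans h1 (by omega), ?_⟩
    intro l hl
    rcases List.mem_cons.mp hl with rfl | hl
    · exact le_trans h1 (by omega)
    · exact h2 l hl

theorem mem_pyZip_not_z (board : List String) :
    ∀ x ∈ pyZip (toCells board), ∀ y ∈ x, ¬(y == Cell.z) := by
  cases hB : toCells board with
  | nil => simp [pyZip]
  | cons x0 r =>
    intro x hx y hy
    simp only [pyZip, List.mem_map, List.mem_range] at hx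
    obtain ⟨j, hj, rfl⟩ := hx
    simp only [List.mem_map] at hy
    obtain ⟨row, hrow, rfl⟩ := hy
    have hjlen : j < row.length := by
      have := (fold_min_le r x0.length).2
      have h1 := fold_min_le r x0.length
      rcases List.mem_cons.mp hrow with rfl | hmem
      · omega
      · have := h1.2 row hmem
        omega
    rw [List.getD_eq_getElem _ _ hjlen]
    have hmem2 : row[j] ∈ row := List.getElem_mem hjlen
    have hrowB : row ∈ toCells board := by rw [hB]; exact hrow
    simp only [toCells, List.mem_map] at hrowB
    obtain ⟨s, _, rfl⟩ := hrowB
    simp only [List.mem_map] at hmem2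
    obtain ⟨c, _, hc⟩ := hmem2
    rw [← hc]
    simp

theorem countA_zero (b : List (List Cell)) (h : ∀ x ∈ b, ∀ y ∈ x, ¬(y == Cell.z)) :
    countA b = 0 := by
  unfold countA
  apply List.sum_eq_zero
  intro v hv
  simp only [List.mem_map] at hv
  obtain ⟨x, hx, rfl⟩ := hv
  rw [List.filter_eq_nil_iff.mpr (h x hx)]
  rfl

theorem countB_zero (g : List (List Cell)) (h : ∀ x ∈ g, ∀ y ∈ x, ¬(y == Cell.z)) :
    countB g = 0 := by
  unfold countB
  apply List.sum_eq_zero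
  intro v hv
  simp only [List.mem_map] at hv
  obtain ⟨x, hx, rfl⟩ := hv
  have : x.count Cell.z = 0 := by
    rw [List.count_eq_length_filter, List.filter_eq_nil_iff.mpr ?_]
    · rfl
    · intro y hy
      have := h x hx y hy
      simpa using this
  rw [this]
  rfl

theorem mem_toCells_not_z (board : List String) :
    ∀ x ∈ toCells board, ∀ y ∈ x, ¬(y == Cell.z) := by
  intro x hx y hy
  simp only [toCells, List.mem_map] at hx
  obtain ⟨s, _, rfl⟩ := hx
  simp only [List.mem_map] at hy
  obtain ⟨c, _, hc⟩ := hy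
  rw [← hc]
  simp

theorem solution_trivial (m n : Int) (board : List String) (h : m ≤ 1 ∨ n ≤ 1) :
    solution m n board = 0 := by
  have hA : loopA m n (m.toNat * n.toNat + 1) ((pyZip (toCells board)).map List.reverse)
      = (pyZip (toCells board)).map List.reverse := by
    have hunf : loopA m n (m.toNat * n.toNat + 1) ((pyZip (toCells board)).map List.reverse)
        = (if (scanA m n ((pyZip (toCells board)).map List.reverse)).1
           then loopA m n (m.toNat * n.toNat)
             (gravA m n (scanA m n ((pyZip (toCells board)).map List.reverse)).2
               ((pyZip (toCells board)).map List.reverse))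
           else gravA m n (scanA m n ((pyZip (toCells board)).map List.reverse)).2
             ((pyZip (toCells board)).map List.reverse)) := rfl
    rw [hunf, scanA_fst_trivial m n _ h, if_neg (by simp)]
    exact gravA_id m n _ _ (erases_trivial m n _ h)
  show countA (loopA m n (m.toNat * n.toNat + 1) ((pyZip (toCells board)).map List.reverse)) = 0
  rw [hA]
  apply countA_zero
  intro x hx y hy
  simp only [List.mem_map] at hx
  obtain ⟨x', hx', rfl⟩ := hx
  exact mem_pyZip_not_z board x' hx' y (List.mem_reverse.mp hy)

theorem solution_alt_trivial (m n : Int) (board : List String) (h : m ≤ 1 ∨ n ≤ 1) :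
    solution_alt m n board = 0 := by
  have hB : loopB m n (m.toNat * n.toNat + 1) (toCells board) = toCells board := by
    have hunf : loopB m n (m.toNat * n.toNat + 1) (toCells board)
        = (if (scanB m n (toCells board)).isEmpty
           then toCells board
           else loopB m n (m.toNat * n.toNat)
             (gravB m n (scanB m n (toCells board)) (toCells board))) := rfl
    rw [hunf, scanB_isEmpty_trivial m n _ h, if_pos rfl]
  show countB (loopB m n (m.toNat * n.toNat + 1) (toCells board)) = 0
  rw [hB]
  exact countB_zero _ (mem_toCells_not_z board)
-- ===== VERDICT (by name: the statement is the Claim_ definition above) =====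
theorem solution_spec : Claim_equal_solution := by
  intro m n board _ hpre
  unfold Spec_solution
  by_cases htriv : m ≤ 1 ∨ n ≤ 1
  · rw [solution_trivial m n board htriv, solution_alt_trivial m n board htriv]
  · rw [not_or] at htriv
    obtain ⟨hlen, hrows⟩ : (board.length : Int) = m ∧ ∀ s ∈ board, (s.toList.length : Int) = n := by
      rcases hpre with h | h
      · exact absurd h (by omega)
      · exact h
    have hblen : board.length = m.toNat := by omega
    have hn0 : 0 ≤ n := by omega
    have hb : board ≠ [] := by
      intro h
      rw [h] at hblen
      simp at hblen
      omega
    have hg0 : Rect m.toNat n.toNat (toCells board) := by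
      constructor
      · simp [toCells, hblen]
      · intro row hrow
        simp only [toCells, List.mem_map] at hrow
        obtain ⟨s', hs', rfl⟩ := hrow
        have := hrows s' hs'
        simp only [List.length_map]
        omega
    have hzip := pyZip_rect (toCells board) hg0 (by simp [toCells, hb])
    have hlenA : ((pyZip (toCells board)).map List.reverse).length = n.toNat := by
      rw [hzip]; simp
    have hrowA : ∀ i, i < n.toNat → ((pyZip (toCells board)).map List.reverse).getD i []
        = ((toCells board).map (fun row => row.getD i Cell.z)).reverse := by
      intro i hi
      rw [hzip]
      rw [getD_map_lt _ List.reverse i (by simpa using hi) [] []]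
      congr 1
      rw [getD_map_lt _ _ i (by simpa using hi) [] 0]
      congr 1
      rw [List.getD_eq_getElem _ _ (by simpa using hi), List.getElem_range]
    have hRectA : Rect n.toNat m.toNat ((pyZip (toCells board)).map List.reverse) := by
      refine ⟨hlenA, ?_⟩
      intro row hrow
      rw [hzip] at hrow
      simp only [List.map_map, List.mem_map, List.mem_range, Function.comp] at hrow
      obtain ⟨q, hq, rfl⟩ := hrow
      simp [toCells, hblen]
    have hrel0 : ∀ i j, i < n.toNat → j < m.toNat →
        gval ((pyZip (toCells board)).map List.reverse) i j
          = gval (toCells board) (m.toNat - 1 - j) i := by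
      intro i j hi hj
      have h1 : gval ((pyZip (toCells board)).map List.reverse) i j
          = (((toCells board).map (fun row => row.getD i Cell.z)).reverse).getD j Cell.z := by
        show (((pyZip (toCells board)).map List.reverse).getD i []).getD j Cell.z = _
        rw [hrowA i hi]
      rw [h1]
      have hmlen : ((toCells board).map (fun row => row.getD i Cell.z)).length = m.toNat := by
        simp [toCells, hblen]
      rw [List.getD_reverse _ (by rw [hmlen]; exact hj), hmlen]
      rw [getD_map_lt _ _ _ (by simp [toCells, hblen]; omega) Cell.z []]
      rfl
    have e1 : solution m n board
        = countA (loopA m n (m.toNat * n.toNat + 1) ((pyZip (toCells board)).map List.reverse)) := rfl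
    have e2 : solution_alt m n board
        = countB (loopB m n (m.toNat * n.toNat + 1) (toCells board)) := rfl
    rw [e1, e2]
    exact loop_rel m n _ _ (toCells board) hRectA hg0 hrel0
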